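-- pv_equiv track=rewrite | github.com/ericmerle3789/Collatz-Junction-Theorem | scripts/research/tao_density_sieve_validation.py | exact_N0_by_dp
-- ===== SOURCE A (Python) =====
-- def exact_N0_by_dp(k, mod_val):
--     """
--     Compute EXACTLY the number of monotone compositions B = (B_0 < ... < B_{k-1})
--     with B_j in {0, ..., S-1} such that corrSum(B) = 0 mod mod_val.
--
--     corrSum = sum_{j=0}^{k-1} 3^{k-1-j} * 2^{B_j}
--
--     Uses DP with prefix sums. O(k * S * mod_val).
--     """
--     S = 2 * k + 1
--     p = mod_val
--
--     # Precompute coefficients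
--     coeff = [[0] * S for _ in range(k)]
--     for j in range(k):
--         pow3 = pow(3, k - 1 - j, p)
--         pow2 = 1
--         for b in range(S):
--             coeff[j][b] = (pow3 * pow2) % p
--             pow2 = (pow2 * 2) % p
--
--     # Layer 0: B_0 in {0, ..., S-k}
--     max_b0 = S - k
--     prefix = [[0] * p for _ in range(S)]
--     for b in range(max_b0 + 1):
--         r = coeff[0][b]
--         prefix[b][r] += 1
--     for b in range(1, S):
--         for r in range(p):
--             prefix[b][r] += prefix[b - 1][r]
--
--     for j in range(1, k):
--         min_bj = j
--         max_bj = S - (k - j)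
--         new_prefix = [[0] * p for _ in range(S)]
--
--         for b in range(min_bj, max_bj + 1):
--             c = coeff[j][b]
--             for r_new in range(p):
--                 r_old = (r_new - c) % p
--                 count = prefix[b - 1][r_old]
--                 new_prefix[b][r_new] = count
--
--         for b in range(1, S):
--             for r in range(p):
--                 new_prefix[b][r] += new_prefix[b - 1][r]
--
--         prefix = new_prefix
--
--     return prefix[S - 1][0]
-- ===== SOURCE B (Python) =====
-- def exact_N0_by_dp(k, mod_val):
--     """Subset (0/1-knapsack) DP: one left-to-right scan over the S positions.
--     State dp[j][r] = number of ways to pick j increasing positions among those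
--     scanned so far with weighted residue r; each position is chosen or skipped
--     (j descending so a position is used at most once).  No prefix-sum tables,
--     no per-layer position bounds; the answer is read off as dp[k][0]."""
--     S = 2 * k + 1
--     p = mod_val
--     dp = [[0] * p for _ in range(k + 1)]
--     dp[0][0] = 1
--     for b in range(S):
--         w = pow(2, b, p)
--         for j in reversed(range(k)):
--             c = (pow(3, k - 1 - j, p) * w) % p
--             dp[j + 1] = [dp[j + 1][r] + dp[j][(r - c) % p] for r in range(p)]
--     return dp[k][0]
-- ===== Notes on version B (the rewrite author's own statement) =====
-- stated objective: alternative
-- what changed: Replaces A's layered last-position DP (per-layer coefficient table, per-layer fill from a cumulated prefix table, then re-cumulation over positions, answer read from the cumulated last row) by a 0/1-knapsack subset DP: one left-to-right scan over the 2k+1 positions with state (number of positions chosen, weighted residue), each position chosen or skipped with the count index updated in place descending, and the answer read directly as dp[k][0]; no prefix sums and no per-layer position bounds.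
import Mathlib
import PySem

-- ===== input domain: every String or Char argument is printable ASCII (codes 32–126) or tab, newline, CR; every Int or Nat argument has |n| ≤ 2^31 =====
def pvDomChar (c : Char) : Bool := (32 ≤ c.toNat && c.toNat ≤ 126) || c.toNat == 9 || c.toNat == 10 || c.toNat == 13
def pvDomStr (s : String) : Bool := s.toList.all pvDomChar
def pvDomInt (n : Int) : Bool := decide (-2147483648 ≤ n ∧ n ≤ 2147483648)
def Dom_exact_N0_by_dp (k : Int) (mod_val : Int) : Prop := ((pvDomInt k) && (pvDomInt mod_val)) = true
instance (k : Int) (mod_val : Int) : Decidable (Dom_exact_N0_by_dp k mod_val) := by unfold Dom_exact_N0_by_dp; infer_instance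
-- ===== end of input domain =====

-- B replaces A's layered last-position DP with cumulative prefix tables by a 0/1-knapsack
-- subset DP: one left-to-right scan over the positions with state (count chosen, residue),
-- each position chosen or skipped (count index updated descending), answer read as dp[k][0]
-- (alternative algorithm, same asymptotic cost).
-- Both ports represent Python's 2-D count arrays as List (List Int) with the shared
-- indexing helpers pvGet/pvSet (tbl[b][r] read / write, Python-exact via pyGetD/pySetD
-- on every index the code touches for inputs satisfying Pre_: k ≥ 1, mod_val ≥ 1).

-- shared 2-D table primitives: `tbl[b][r]` and `tbl[b][r] = v`
def pvGet (t : List (List Int)) (b r : Int) : Int :=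
  PySem.List.pyGetD (PySem.List.pyGetD t b []) r 0

def pvSet (t : List (List Int)) (b r v : Int) : List (List Int) :=
  PySem.List.pySetD t b (PySem.List.pySetD (PySem.List.pyGetD t b []) r v)

-- `[[0] * p for _ in range(rows)]`
def pvZeros (rows p : Int) : List (List Int) :=
  (PySem.List.pyRange 0 rows 1).map (fun _ => PySem.List.pyRepeat [0] p)

-- ===== PORT A =====
-- `for r in range(p): tbl[b][r] += tbl[b-1][r]`  (one row of A's cumulation loop)
def pvCumRow (p : Int) (t : List (List Int)) (b : Int) : List (List Int) :=
  (PySem.List.pyRange 0 p 1).foldl (fun t r => pvSet t b r (pvGet t b r + pvGet t (b - 1) r)) t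

-- `for b in range(1, S): for r in range(p): tbl[b][r] += tbl[b-1][r]`
def pvCum (S p : Int) (t : List (List Int)) : List (List Int) :=
  (PySem.List.pyRange 1 S 1).foldl (pvCumRow p) t

-- body of A's coefficient loop over b; the exponent k-1-j is ≥ 0 for every j the loop
-- visits when k ≥ 1, so `.toNat` is exact (pow(3, k-1-j, p) = PySem.Int.powMod)
def pvCoeffStep (k p j : Int) (st : List (List Int) × Int) (b : Int) :
    List (List Int) × Int :=
  (pvSet st.1 j b (PySem.Int.mod (PySem.Int.powMod 3 (k - 1 - j).toNat p * st.2) p),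
   PySem.Int.mod (st.2 * 2) p)

-- one iteration of A's main layer loop (fill new_prefix from prefix[b-1], then cumulate)
def pvStepA (k p S : Int) (co : List (List Int)) (pf : List (List Int)) (j : Int) :
    List (List Int) :=
  pvCum S p
    ((PySem.List.pyRange j ((S - (k - j)) + 1) 1).foldl (fun np b =>
        (PySem.List.pyRange 0 p 1).foldl (fun np r =>
          pvSet np b r (pvGet pf (b - 1) (PySem.Int.mod (r - pvGet co j b) p))) np)
      (pvZeros S p))

-- coeff[j][b] table of A
def pvCoeffA (k p S : Int) : List (List Int) :=
  (PySem.List.pyRange 0 k 1).foldl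
    (fun cf j => ((PySem.List.pyRange 0 S 1).foldl (pvCoeffStep k p j) (cf, 1)).1)
    (pvZeros k S)

def exact_N0_by_dp (k : Int) (mod_val : Int) : Int :=
  let S := 2 * k + 1
  let p := mod_val
  let coeff := pvCoeffA k p S
  let max_b0 := S - k
  let prefix0 :=
    (PySem.List.pyRange 0 (max_b0 + 1) 1).foldl
      (fun pf b => pvSet pf b (pvGet coeff 0 b) (pvGet pf b (pvGet coeff 0 b) + 1))
      (pvZeros S p)
  let prefix1 := pvCum S p prefix0
  let prefixF := (PySem.List.pyRange 1 k 1).foldl (pvStepA k p S coeff) prefix1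
  pvGet prefixF (S - 1) 0

-- ===== PORT B =====
-- `dp[j+1] = [dp[j+1][r] + dp[j][(r - c) % p] for r in range(p)]` with
-- c = (pow(3, k-1-j, p) * w) % p: one iteration of B's inner (descending j) loop
def pvStepRowB (k p w : Int) (dp : List (List Int)) (j : Int) : List (List Int) :=
  PySem.List.pySetD dp (j + 1)
    ((PySem.List.pyRange 0 p 1).map (fun r =>
      pvGet dp (j + 1) r +
        pvGet dp j (PySem.Int.mod
          (r - PySem.Int.mod (PySem.Int.powMod 3 (k - 1 - j).toNat p * w) p) p)))

-- one position b: `w = pow(2, b, p)` then `for j in reversed(range(k)): …`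
def pvScanB (k p : Int) (dp : List (List Int)) (b : Int) : List (List Int) :=
  ((PySem.List.pyRange 0 k 1).reverse).foldl
    (pvStepRowB k p (PySem.Int.powMod 2 b.toNat p)) dp

def exact_N0_by_dp_alt (k : Int) (mod_val : Int) : Int :=
  let S := 2 * k + 1
  let p := mod_val
  let dp0 := pvSet (pvZeros (k + 1) p) 0 0 1
  let dpF := (PySem.List.pyRange 0 S 1).foldl (pvScanB k p) dp0
  pvGet dpF k 0

-- ===== PRECONDITION & SPEC =====
-- Pre_ excludes exactly the inputs on which Python A raises: k ≤ 0 (IndexError on the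
-- layer-0 fill) and mod_val ≤ 0 (ValueError from pow(…, 0) or IndexError on empty rows).
def Pre_exact_N0_by_dp (k : Int) (mod_val : Int) : Prop := 1 ≤ k ∧ 1 ≤ mod_val
instance (k : Int) (mod_val : Int) : Decidable (Pre_exact_N0_by_dp k mod_val) := by
  unfold Pre_exact_N0_by_dp; infer_instance

def pvWitness_exact_N0_by_dp : Int × Int := (2, 5)

def Spec_exact_N0_by_dp (k : Int) (mod_val : Int) (out : Int) : Prop :=
  out = exact_N0_by_dp_alt k mod_val
instance (k : Int) (mod_val : Int) (out : Int) : Decidable (Spec_exact_N0_by_dp k mod_val out) := by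
  unfold Spec_exact_N0_by_dp; infer_instance

-- ===== CLAIM (what is proved, stated in full; the proofs are below) =====
def Claim_equal_exact_N0_by_dp : Prop :=
  ∀ (k : Int) (mod_val : Int), Dom_exact_N0_by_dp k mod_val →
    Pre_exact_N0_by_dp k mod_val →
    Spec_exact_N0_by_dp k mod_val (exact_N0_by_dp k mod_val)

-- ===== LEMMAS AND PROOFS =====

-- canonical layer coefficient 3^(k-1-j) * 2^b mod p
def pvCoefFn (k p j b : Int) : Int :=
  PySem.Int.mod (PySem.Int.powMod 3 (k - 1 - j).toNat p * PySem.Int.powMod 2 b.toNat p) p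

-- the common combinatorial quantity: pvG k p n j r = number of ways to choose j of the
-- first n positions, strictly increasing, with weighted residue r (B's dp after n scans)
def pvG (k p : Int) : Nat → Int → Int → Int
  | 0, j, r => if j = 0 ∧ r = 0 then 1 else 0
  | n + 1, j, r =>
      pvG k p n j r +
        (if 1 ≤ j ∧ j ≤ k then
          pvG k p n (j - 1) (PySem.Int.mod (r - pvCoefFn k p (j - 1) (n : Int)) p)
        else 0)

lemma pvG_zero_of_lt (k p : Int) (n : Nat) : ∀ j r, (n : Int) < j → pvG k p n j r = 0 := by
  induction n with
  | zero => intro j r hj; simp only [pvG]; rw [if_neg (by omega)]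
  | succ n ih =>
    intro j r hj
    simp only [pvG]
    rw [ih j r (by push_cast at hj ⊢; omega)]
    by_cases hg : 1 ≤ j ∧ j ≤ k
    · rw [if_pos hg, ih (j - 1) _ (by push_cast at hj ⊢; omega), add_zero]
    · rw [if_neg hg, add_zero]

lemma pvG_row0 (k p : Int) (n : Nat) : ∀ r, pvG k p n 0 r = if r = 0 then 1 else 0 := by
  induction n with
  | zero => intro r; simp [pvG]
  | succ n ih =>
    intro r
    simp only [pvG]
    rw [ih, if_neg (show ¬((1:Int) ≤ 0 ∧ (0:Int) ≤ k) from by omega), add_zero]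

lemma pvModSubZero (r c p : Int) (hp : 0 < p) (hr : 0 ≤ r) (hrp : r < p)
    (hc : 0 ≤ c) (hcp : c < p) : PySem.Int.mod (r - c) p = 0 ↔ r = c := by
  rw [PySem.Int.mod_eq_emod_of_pos hp]
  constructor
  · intro h
    rcases Int.dvd_of_emod_eq_zero h with ⟨q, hq⟩
    have hq1 : q = 0 := by nlinarith
    rw [hq1, mul_zero] at hq
    omega
  · intro h; simp [h]

-- ---- 2-D table primitives: shape invariant and pointwise read/write laws ----

def pvShape (S p : Int) (t : List (List Int)) : Prop :=
  t.length = S.toNat ∧ ∀ row ∈ t, row.length = p.toNat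

lemma pvShape_zeros (S p : Int) : pvShape S p (pvZeros S p) := by
  constructor
  · simp [pvZeros, PySem.List.length_pyRange_one]
  · intro row hrow
    simp only [pvZeros, List.mem_map] at hrow
    obtain ⟨x, _, hx⟩ := hrow
    rw [← hx, PySem.List.pyRepeat_singleton, List.length_replicate]

lemma pvGet_zeros (S p b r : Int) (hb0 : 0 ≤ b) (hbS : b < S) (hr0 : 0 ≤ r) :
    pvGet (pvZeros S p) b r = 0 := by
  unfold pvGet pvZeros
  rw [PySem.List.pyGetD_map_pyRange_of_nonneg _ S b [] hb0 hbS,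
    PySem.List.pyRepeat_singleton, PySem.List.pyGetD_of_nonneg _ _ hr0]
  simp

lemma pvShape_set (S p : Int) (t : List (List Int)) (h : pvShape S p t) (b r v : Int)
    (hb0 : 0 ≤ b) (hbS : b < S) (hr0 : 0 ≤ r) :
    pvShape S p (pvSet t b r v) := by
  obtain ⟨hlen, hrows⟩ := h
  have hbl : b.toNat < t.length := by omega
  unfold pvSet
  rw [PySem.List.pySetD_of_nonneg _ _ hb0, PySem.List.pySetD_of_nonneg _ _ hr0]
  constructor
  · rw [List.length_set, hlen]
  · intro row hrow
    rcases List.mem_or_eq_of_mem_set hrow with h | h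
    · exact hrows row h
    · rw [h, List.length_set]
      exact hrows _ (by
        rw [PySem.List.pyGetD_eq_getElem _ _ hb0 (by omega)]
        exact List.getElem_mem _)

lemma pvGet_set (S p : Int) (t : List (List Int)) (h : pvShape S p t) (b r v b' r' : Int)
    (hb0 : 0 ≤ b) (hbS : b < S) (hr0 : 0 ≤ r) (hrp : r < p)
    (hb'0 : 0 ≤ b') (hb'S : b' < S) (hr'0 : 0 ≤ r') (hr'p : r' < p) :
    pvGet (pvSet t b r v) b' r' = if b' = b ∧ r' = r then v else pvGet t b' r' := by
  obtain ⟨hlen, hrows⟩ := h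
  have hbl : b.toNat < t.length := by omega
  have hb'l : b'.toNat < t.length := by omega
  have hrowmem : ∀ c : Int, 0 ≤ c → c < S → PySem.List.pyGetD t c [] ∈ t := by
    intro c hc0 hcS
    rw [PySem.List.pyGetD_eq_getElem _ _ hc0 (by omega)]
    exact List.getElem_mem _
  have hrowlen : ∀ c : Int, 0 ≤ c → c < S → (PySem.List.pyGetD t c []).length = p.toNat :=
    fun c hc0 hcS => hrows _ (hrowmem c hc0 hcS)
  unfold pvSet pvGet
  rw [PySem.List.pySetD_of_nonneg _ _ hb0, PySem.List.pySetD_of_nonneg _ _ hr0]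
  have houter : PySem.List.pyGetD (t.set b.toNat ((PySem.List.pyGetD t b []).set r.toNat v)) b' []
      = if b' = b then (PySem.List.pyGetD t b []).set r.toNat v else PySem.List.pyGetD t b' [] := by
    rw [PySem.List.pyGetD_eq_getElem _ _ hb'0 (by rw [List.length_set]; omega),
      List.getElem_set]
    by_cases hbb : b' = b
    · rw [if_pos (by omega), if_pos hbb]
    · rw [if_neg (by omega), if_neg hbb]
      exact (PySem.List.pyGetD_eq_getElem _ _ hb'0 (by omega)).symm
  rw [houter]
  by_cases hbb : b' = b
  · subst hbb
    have hrl : ((PySem.List.pyGetD t b' []).set r.toNat v).length = p.toNat := by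
      rw [List.length_set]; exact hrowlen b' hb'0 hb'S
    rw [if_pos rfl, PySem.List.pyGetD_eq_getElem _ _ hr'0 (by omega), List.getElem_set]
    by_cases hrr : r' = r
    · rw [if_pos (by omega), if_pos ⟨rfl, hrr⟩]
    · rw [if_neg (by omega), if_neg (by tauto)]
      exact (PySem.List.pyGetD_eq_getElem _ _ hr'0
        (by rw [hrowlen b' hb'0 hb'S]; omega)).symm
  · rw [if_neg hbb, if_neg (by tauto)]

-- ---- generic loop shapes over tables ----

-- writing one row with values independent of the accumulator
lemma pvFoldl_setRow (S p : Int) (L : List Int) (hL : ∀ x ∈ L, 0 ≤ x ∧ x < p)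
    (b : Int) (hb0 : 0 ≤ b) (hbS : b < S) (v : Int → Int) (t : List (List Int))
    (ht : pvShape S p t) :
    pvShape S p (L.foldl (fun t r => pvSet t b r (v r)) t)
    ∧ ∀ b' r', 0 ≤ b' → b' < S → 0 ≤ r' → r' < p →
      pvGet (L.foldl (fun t r => pvSet t b r (v r)) t) b' r'
        = if b' = b ∧ r' ∈ L then v r' else pvGet t b' r' := by
  induction L generalizing t with
  | nil => exact ⟨ht, fun b' r' _ _ _ _ => by simp⟩
  | cons a L ih =>
    obtain ⟨ha0, hap⟩ := hL a List.mem_cons_self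
    have ht1 : pvShape S p (pvSet t b a (v a)) := pvShape_set S p t ht b a _ hb0 hbS ha0
    obtain ⟨ihs, ihp⟩ := ih (fun x hx => hL x (List.mem_cons_of_mem _ hx)) _ ht1
    refine ⟨ihs, fun b' r' hb'0 hb'S hr'0 hr'p => ?_⟩
    simp only [List.foldl_cons]
    rw [ihp b' r' hb'0 hb'S hr'0 hr'p,
      pvGet_set S p t ht b a _ b' r' hb0 hbS ha0 hap hb'0 hb'S hr'0 hr'p]
    by_cases hbb : b' = b <;> by_cases hra : r' = a <;> by_cases hm : r' ∈ L <;>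
      simp [hbb, hra, hm, List.mem_cons]

-- writing a block of rows with values independent of the accumulator
lemma pvFoldl_setBlock (S p : Int) (L : List Int) (hL : ∀ x ∈ L, 0 ≤ x ∧ x < S)
    (v : Int → Int → Int) (t : List (List Int)) (ht : pvShape S p t) :
    pvShape S p (L.foldl (fun t b =>
        (PySem.List.pyRange 0 p 1).foldl (fun t r => pvSet t b r (v b r)) t) t)
    ∧ ∀ b' r', 0 ≤ b' → b' < S → 0 ≤ r' → r' < p →
      pvGet (L.foldl (fun t b =>
          (PySem.List.pyRange 0 p 1).foldl (fun t r => pvSet t b r (v b r)) t) t) b' r'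
        = if b' ∈ L then v b' r' else pvGet t b' r' := by
  induction L generalizing t with
  | nil => exact ⟨ht, fun b' r' _ _ _ _ => by simp⟩
  | cons a L ih =>
    obtain ⟨ha0, haS⟩ := hL a List.mem_cons_self
    obtain ⟨h1s, h1p⟩ := pvFoldl_setRow S p (PySem.List.pyRange 0 p 1)
      (fun x hx => PySem.List.mem_pyRange_one.mp hx) a ha0 haS (v a) t ht
    obtain ⟨ihs, ihp⟩ := ih (fun x hx => hL x (List.mem_cons_of_mem _ hx)) _ h1s
    refine ⟨ihs, fun b' r' hb'0 hb'S hr'0 hr'p => ?_⟩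
    simp only [List.foldl_cons]
    rw [ihp b' r' hb'0 hb'S hr'0 hr'p, h1p b' r' hb'0 hb'S hr'0 hr'p]
    by_cases hba : b' = a
    · subst hba
      by_cases hbL : b' ∈ L <;>
        simp [hbL, PySem.List.mem_pyRange_one, hr'0, hr'p, List.mem_cons]
    · by_cases hbL : b' ∈ L <;> simp [hbL, hba, List.mem_cons]

-- the `tbl[b][g b] += 1` fill loop (layer 0 of A)
lemma pvFoldl_addOne (S p : Int) (L : List Int) (hnd : L.Nodup)
    (hL : ∀ x ∈ L, 0 ≤ x ∧ x < S) (g : Int → Int) (hg : ∀ x ∈ L, 0 ≤ g x ∧ g x < p)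
    (t : List (List Int)) (ht : pvShape S p t) :
    pvShape S p (L.foldl (fun t b => pvSet t b (g b) (pvGet t b (g b) + 1)) t)
    ∧ ∀ b' r', 0 ≤ b' → b' < S → 0 ≤ r' → r' < p →
      pvGet (L.foldl (fun t b => pvSet t b (g b) (pvGet t b (g b) + 1)) t) b' r'
        = if b' ∈ L ∧ r' = g b' then pvGet t b' r' + 1 else pvGet t b' r' := by
  induction L generalizing t with
  | nil => exact ⟨ht, fun b' r' _ _ _ _ => by simp⟩
  | cons a L ih =>
    obtain ⟨ha, hnd'⟩ := List.nodup_cons.mp hnd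
    obtain ⟨ha0, haS⟩ := hL a List.mem_cons_self
    obtain ⟨hga, hgap⟩ := hg a List.mem_cons_self
    have ht1 : pvShape S p (pvSet t a (g a) (pvGet t a (g a) + 1)) :=
      pvShape_set S p t ht a (g a) _ ha0 haS hga
    obtain ⟨ihs, ihp⟩ := ih hnd' (fun x hx => hL x (List.mem_cons_of_mem _ hx))
      (fun x hx => hg x (List.mem_cons_of_mem _ hx)) _ ht1
    refine ⟨ihs, fun b' r' hb'0 hb'S hr'0 hr'p => ?_⟩
    simp only [List.foldl_cons]
    rw [ihp b' r' hb'0 hb'S hr'0 hr'p]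
    have hset := fun (rr : Int) hr0 hrp => pvGet_set S p t ht a (g a) (pvGet t a (g a) + 1)
      b' rr ha0 haS hga hgap hb'0 hb'S hr0 hrp
    by_cases hbL : b' ∈ L
    · have hba : b' ≠ a := fun h => ha (h ▸ hbL)
      by_cases hrg : r' = g b'
      · rw [if_pos ⟨hbL, hrg⟩, if_pos ⟨List.mem_cons_of_mem _ hbL, hrg⟩,
          hset r' hr'0 hr'p, if_neg (by tauto)]
      · rw [if_neg (by tauto), if_neg (by
            intro h
            rcases List.mem_cons.mp h.1 with h1 | h1
            · exact hba h1
            · exact hrg h.2),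
          hset r' hr'0 hr'p, if_neg (by tauto)]
    · by_cases hba : b' = a
      · subst hba
        by_cases hrg : r' = g b'
        · rw [if_neg (by tauto), if_pos ⟨List.mem_cons_self, hrg⟩, hset r' hr'0 hr'p,
            if_pos ⟨rfl, hrg⟩, hrg]
        · rw [if_neg (by tauto), if_neg (by
              intro h
              rcases List.mem_cons.mp h.1 with _ | h1
              · exact hrg h.2
              · exact hbL h1),
            hset r' hr'0 hr'p, if_neg (by tauto)]
      · rw [if_neg (by tauto), if_neg (by
            intro h
            rcases List.mem_cons.mp h.1 with h1 | h1
            · exact hba h1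
            · exact hbL h1),
          hset r' hr'0 hr'p, if_neg (by tauto)]

-- one row of the cumulation loop, generic list version
lemma pvFoldl_cumRow (S p : Int) (L : List Int) (hnd : L.Nodup)
    (hL : ∀ x ∈ L, 0 ≤ x ∧ x < p) (b : Int) (hb1 : 1 ≤ b) (hbS : b < S)
    (t : List (List Int)) (ht : pvShape S p t) :
    pvShape S p (L.foldl (fun t r => pvSet t b r (pvGet t b r + pvGet t (b - 1) r)) t)
    ∧ ∀ b' r', 0 ≤ b' → b' < S → 0 ≤ r' → r' < p →
      pvGet (L.foldl (fun t r => pvSet t b r (pvGet t b r + pvGet t (b - 1) r)) t) b' r'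
        = if b' = b ∧ r' ∈ L then pvGet t b r' + pvGet t (b - 1) r' else pvGet t b' r' := by
  induction L generalizing t with
  | nil => exact ⟨ht, fun b' r' _ _ _ _ => by simp⟩
  | cons a L ih =>
    obtain ⟨ha, hnd'⟩ := List.nodup_cons.mp hnd
    obtain ⟨ha0, hap⟩ := hL a List.mem_cons_self
    have ht1 : pvShape S p (pvSet t b a (pvGet t b a + pvGet t (b - 1) a)) :=
      pvShape_set S p t ht b a _ (by omega) hbS ha0
    obtain ⟨ihs, ihp⟩ := ih hnd' (fun x hx => hL x (List.mem_cons_of_mem _ hx)) _ ht1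
    refine ⟨ihs, fun b' r' hb'0 hb'S hr'0 hr'p => ?_⟩
    simp only [List.foldl_cons]
    rw [ihp b' r' hb'0 hb'S hr'0 hr'p]
    have hset := fun (bb rr : Int) hbb0 hbbS hrr0 hrrp =>
      pvGet_set S p t ht b a (pvGet t b a + pvGet t (b - 1) a) bb rr
        (by omega) hbS ha0 hap hbb0 hbbS hrr0 hrrp
    by_cases hbb : b' = b
    · subst hbb
      by_cases hm : r' ∈ L
      · have hra : r' ≠ a := fun h => ha (h ▸ hm)
        rw [if_pos ⟨rfl, hm⟩, if_pos ⟨rfl, List.mem_cons_of_mem _ hm⟩,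
          hset b' r' hb'0 hb'S hr'0 hr'p, if_neg (by tauto),
          hset (b' - 1) r' (by omega) (by omega) hr'0 hr'p, if_neg (by omega)]
      · by_cases hra : r' = a
        · rw [if_neg (by tauto), if_pos ⟨rfl, by rw [hra]; exact List.mem_cons_self⟩,
            hset b' r' hb'0 hb'S hr'0 hr'p, if_pos ⟨rfl, hra⟩, hra]
        · rw [if_neg (by tauto), if_neg (by
              intro h
              rcases List.mem_cons.mp h.2 with h1 | h1
              · exact hra h1
              · exact hm h1),
            hset b' r' hb'0 hb'S hr'0 hr'p, if_neg (by tauto)]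
    · rw [if_neg (by tauto), if_neg (by tauto), hset b' r' hb'0 hb'S hr'0 hr'p,
        if_neg (by omega)]

lemma pvCumRow_apply (S p : Int) (t : List (List Int)) (ht : pvShape S p t) (b : Int)
    (hb1 : 1 ≤ b) (hbS : b < S) :
    pvShape S p (pvCumRow p t b)
    ∧ ∀ b' r', 0 ≤ b' → b' < S → 0 ≤ r' → r' < p →
      pvGet (pvCumRow p t b) b' r'
        = if b' = b then pvGet t b r' + pvGet t (b - 1) r' else pvGet t b' r' := by
  unfold pvCumRow
  obtain ⟨hs, hpt⟩ := pvFoldl_cumRow S p (PySem.List.pyRange 0 p 1)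
    (PySem.List.nodup_pyRange_one _ _) (fun x hx => PySem.List.mem_pyRange_one.mp hx)
    b hb1 hbS t ht
  refine ⟨hs, fun b' r' hb'0 hb'S hr'0 hr'p => ?_⟩
  rw [hpt b' r' hb'0 hb'S hr'0 hr'p]
  by_cases hbb : b' = b <;>
    simp [hbb, PySem.List.mem_pyRange_one, hr'0, hr'p]

-- invariant of the cumulation loop, over List.range
lemma pvCum_inv (S p : Int) (F : List (List Int)) (hF : pvShape S p F) (n : Nat)
    (hn : (n : Int) ≤ S - 1) :
    pvShape S p ((List.range n).foldl (fun t (i : Nat) => pvCumRow p t (1 + (i : Int))) F)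
    ∧ ∀ b' r', 0 ≤ b' → b' < S → 0 ≤ r' → r' < p →
      pvGet ((List.range n).foldl (fun t (i : Nat) => pvCumRow p t (1 + (i : Int))) F) b' r'
        = if b' < 1 + (n : Int) then
            ((PySem.List.pyRange 0 (b' + 1) 1).map (fun i => pvGet F i r')).sum
          else pvGet F b' r' := by
  induction n with
  | zero =>
    refine ⟨hF, fun b' r' hb'0 hb'S hr'0 hr'p => ?_⟩
    simp only [List.range_zero, List.foldl_nil, Nat.cast_zero]
    split_ifs with h
    · have hb0 : b' = 0 := by omega
      subst hb0
      rw [show (0 : Int) + 1 = 0 + 1 from rfl, PySem.List.pyRange_one_singleton]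
      simp
    · rfl
  | succ n ih =>
    obtain ⟨ihs, ihp⟩ := ih (by push_cast at hn ⊢; omega)
    have hrow := pvCumRow_apply S p _ ihs (1 + (n : Int)) (by omega)
      (by push_cast at hn ⊢; omega)
    obtain ⟨hrs, hrp⟩ := hrow
    constructor
    · rw [List.range_succ, List.foldl_append, List.foldl_cons, List.foldl_nil]
      exact hrs
    · intro b' r' hb'0 hb'S hr'0 hr'p
      rw [List.range_succ, List.foldl_append, List.foldl_cons, List.foldl_nil]
      rw [hrp b' r' hb'0 hb'S hr'0 hr'p]
      by_cases hb : b' = 1 + (n : Int)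
      · subst hb
        rw [if_pos rfl, if_pos (by push_cast; omega)]
        have e1 : (1 : Int) + (n : Int) - 1 = (n : Int) := by ring
        rw [e1, ihp _ r' (by omega) hb'S hr'0 hr'p, ihp _ r' (by omega) (by omega) hr'0 hr'p]
        rw [if_neg (by omega), if_pos (by omega)]
        have hsplit : PySem.List.pyRange 0 ((1 + (n : Int)) + 1) 1
            = PySem.List.pyRange 0 ((n : Int) + 1) 1 ++ [(n : Int) + 1] := by
          rw [show (1 + (n : Int)) + 1 = ((n : Int) + 1) + 1 by ring,
            PySem.List.pyRange_one_succ_right (by omega)]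
        rw [hsplit, List.map_append, List.sum_append]
        simp [show (1 : Int) + (n : Int) = (n : Int) + 1 by ring, add_comm]
      · rw [if_neg hb, ihp b' r' hb'0 hb'S hr'0 hr'p]
        by_cases hin : b' < 1 + (n : Int)
        · rw [if_pos hin, if_pos (by push_cast; omega)]
        · rw [if_neg hin, if_neg (by push_cast at hin ⊢; omega)]

lemma pvCum_shape (S p : Int) (F : List (List Int)) (hF : pvShape S p F) (hS : 1 ≤ S) :
    pvShape S p (pvCum S p F) := by
  unfold pvCum
  rw [PySem.List.pyRange_one, List.foldl_map]
  exact (pvCum_inv S p F hF (S - 1).toNat (by omega)).1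

lemma pvCum_apply (S p : Int) (hS : 1 ≤ S) (F : List (List Int)) (hF : pvShape S p F)
    (b' r' : Int) (hb0 : 0 ≤ b') (hbS : b' < S) (hr0 : 0 ≤ r') (hrp : r' < p) :
    pvGet (pvCum S p F) b' r'
      = ((PySem.List.pyRange 0 (b' + 1) 1).map (fun i => pvGet F i r')).sum := by
  unfold pvCum
  rw [PySem.List.pyRange_one, List.foldl_map]
  rw [(pvCum_inv S p F hF (S - 1).toNat (by omega)).2 b' r' hb0 hbS hr0 hrp,
    if_pos (by omega)]

-- ---- A's coefficient table ----

lemma pvCoeffStep_fst (k p j : Int) (st : List (List Int) × Int) (b : Int) :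
    (pvCoeffStep k p j st b).1
      = pvSet st.1 j b (PySem.Int.mod (PySem.Int.powMod 3 (k - 1 - j).toNat p * st.2) p) := rfl

lemma pvCoeffStep_snd (k p j : Int) (st : List (List Int) × Int) (b : Int) :
    (pvCoeffStep k p j st b).2 = PySem.Int.mod (st.2 * 2) p := rfl

-- the coefficient inner loop: table row j and invariant of the doubling accumulator
lemma pvCoeffA_inner (k p S j : Int) (hp : 0 < p) (hj0 : 0 ≤ j) (hjk : j < k)
    (n : Nat) (hn : (n : Int) ≤ S) (cf : List (List Int)) (hcf : pvShape k S cf) :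
    pvShape k S (((List.range n).foldl (fun st (i : Nat) => pvCoeffStep k p j st (i : Int)) (cf, 1)).1)
    ∧ (∀ j' b', 0 ≤ j' → j' < k → 0 ≤ b' → b' < S →
      pvGet (((List.range n).foldl (fun st (i : Nat) => pvCoeffStep k p j st (i : Int)) (cf, 1)).1) j' b'
        = if j' = j ∧ b' < (n : Int) then pvCoefFn k p j b' else pvGet cf j' b')
    ∧ PySem.Int.mod
        (((List.range n).foldl (fun st (i : Nat) => pvCoeffStep k p j st (i : Int)) (cf, 1)).2) p
      = PySem.Int.mod (2 ^ n) p := by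
  induction n with
  | zero =>
    refine ⟨hcf, fun j' b' _ _ hb'0 _ => ?_, by simp⟩
    simp only [List.range_zero, List.foldl_nil, Nat.cast_zero]
    rw [if_neg (by omega)]
  | succ n ih =>
    obtain ⟨ihs, ihp, ih2⟩ := ih (by push_cast at hn ⊢; omega)
    have e2n : (((List.range n).foldl
        (fun st (i : Nat) => pvCoeffStep k p j st (i : Int)) (cf, 1)).2) % p
        = 2 ^ n % p := by
      rw [← PySem.Int.mod_eq_emod_of_pos hp, ih2, PySem.Int.mod_eq_emod_of_pos hp]
    have hv : PySem.Int.mod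
        (PySem.Int.powMod 3 (k - 1 - j).toNat p *
          (((List.range n).foldl
            (fun st (i : Nat) => pvCoeffStep k p j st (i : Int)) (cf, 1)).2)) p
        = pvCoefFn k p j (n : Int) := by
      unfold pvCoefFn
      rw [Int.toNat_natCast, PySem.Int.powMod_eq 2 n p]
      simp only [PySem.Int.mod_eq_emod_of_pos hp]
      conv_lhs => rw [Int.mul_emod]
      conv_rhs => rw [Int.mul_emod, Int.emod_emod_of_dvd _ dvd_rfl]
      rw [e2n]
    have hshape1 : pvShape k S ((pvCoeffStep k p j
        ((List.range n).foldl (fun st (i : Nat) => pvCoeffStep k p j st (i : Int)) (cf, 1))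
        (n : Int)).1) := by
      rw [pvCoeffStep_fst]
      exact pvShape_set k S _ ihs j (n : Int) _ hj0 hjk (by positivity)
    refine ⟨?_, ?_, ?_⟩
    · rw [List.range_succ, List.foldl_append, List.foldl_cons, List.foldl_nil]
      exact hshape1
    · intro j' b' hj'0 hj'k hb'0 hb'S
      rw [List.range_succ, List.foldl_append, List.foldl_cons, List.foldl_nil,
        pvCoeffStep_fst]
      rw [pvGet_set k S _ ihs j (n : Int) _ j' b' hj0 hjk (by positivity)
        (by push_cast at hn ⊢; omega) hj'0 hj'k hb'0 hb'S, hv]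
      by_cases hj' : j' = j
      · subst hj'
        by_cases hb' : b' = (n : Int)
        · subst hb'
          rw [if_pos ⟨rfl, rfl⟩, if_pos ⟨rfl, by push_cast; omega⟩]
        · rw [if_neg (by tauto), ihp j' b' hj'0 hj'k hb'0 hb'S]
          by_cases hlt : b' < (n : Int)
          · rw [if_pos ⟨rfl, hlt⟩, if_pos ⟨rfl, by push_cast; omega⟩]
          · rw [if_neg (by tauto), if_neg (by push_cast; omega)]
      · rw [if_neg (by tauto), ihp j' b' hj'0 hj'k hb'0 hb'S, if_neg (by tauto),
          if_neg (by tauto)]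
    · rw [List.range_succ, List.foldl_append, List.foldl_cons, List.foldl_nil,
        pvCoeffStep_snd]
      simp only [PySem.Int.mod_eq_emod_of_pos hp]
      rw [pow_succ, Int.mul_emod, e2n, ← Int.mul_emod]
      exact Int.emod_emod_of_dvd _ dvd_rfl

-- the inner loop over the pyRange
lemma pvCoeffA_inner' (k p S j : Int) (hp : 0 < p) (hS : 0 ≤ S) (hj0 : 0 ≤ j)
    (hjk : j < k) (cf : List (List Int)) (hcf : pvShape k S cf) :
    pvShape k S (((PySem.List.pyRange 0 S 1).foldl (pvCoeffStep k p j) (cf, 1)).1)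
    ∧ ∀ j' b', 0 ≤ j' → j' < k → 0 ≤ b' → b' < S →
      pvGet (((PySem.List.pyRange 0 S 1).foldl (pvCoeffStep k p j) (cf, 1)).1) j' b'
        = if j' = j then pvCoefFn k p j b' else pvGet cf j' b' := by
  have h0 : PySem.List.pyRange 0 S 1 = (List.range (S - 0).toNat).map (fun i : Nat => (i : Int)) := by
    rw [PySem.List.pyRange_one]
    exact List.map_congr_left (fun x _ => by ring)
  rw [h0, List.foldl_map]
  obtain ⟨hs, hpt, _⟩ := pvCoeffA_inner k p S j hp hj0 hjk (S - 0).toNat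
    (by omega) cf hcf
  refine ⟨hs, fun j' b' hj'0 hj'k hb'0 hb'S => ?_⟩
  rw [hpt j' b' hj'0 hj'k hb'0 hb'S]
  by_cases hjj : j' = j
  · rw [if_pos ⟨hjj, by omega⟩, if_pos hjj]
  · rw [if_neg (by tauto), if_neg hjj]

-- the whole coeff table
lemma pvCoeffA_aux (k p S : Int) (hp : 0 < p) (hS : 0 ≤ S) (L : List Int)
    (hL : ∀ x ∈ L, 0 ≤ x ∧ x < k) (cf : List (List Int)) (hcf : pvShape k S cf) :
    pvShape k S (L.foldl
      (fun cf j => ((PySem.List.pyRange 0 S 1).foldl (pvCoeffStep k p j) (cf, 1)).1) cf)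
    ∧ ∀ j' b', 0 ≤ j' → j' < k → 0 ≤ b' → b' < S →
      pvGet (L.foldl
        (fun cf j => ((PySem.List.pyRange 0 S 1).foldl (pvCoeffStep k p j) (cf, 1)).1) cf) j' b'
        = if j' ∈ L then pvCoefFn k p j' b' else pvGet cf j' b' := by
  induction L generalizing cf with
  | nil => exact ⟨hcf, fun j' b' _ _ _ _ => by simp⟩
  | cons a L ih =>
    obtain ⟨ha0, hak⟩ := hL a List.mem_cons_self
    obtain ⟨h1s, h1p⟩ := pvCoeffA_inner' k p S a hp hS ha0 hak cf hcf
    obtain ⟨ihs, ihp⟩ := ih (fun x hx => hL x (List.mem_cons_of_mem _ hx)) _ h1s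
    refine ⟨ihs, fun j' b' hj'0 hj'k hb'0 hb'S => ?_⟩
    simp only [List.foldl_cons]
    rw [ihp j' b' hj'0 hj'k hb'0 hb'S]
    by_cases hjL : j' ∈ L
    · simp [hjL, List.mem_cons]
    · rw [if_neg hjL, h1p j' b' hj'0 hj'k hb'0 hb'S]
      by_cases hja : j' = a
      · subst hja; simp [List.mem_cons]
      · simp [hja, hjL, List.mem_cons]

lemma pvCoeffA_apply (k p S : Int) (hp : 0 < p) (hS : 0 ≤ S) (j' b' : Int)
    (hj0 : 0 ≤ j') (hjk : j' < k) (hb0 : 0 ≤ b') (hbS : b' < S) :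
    pvGet (pvCoeffA k p S) j' b' = pvCoefFn k p j' b' := by
  unfold pvCoeffA
  obtain ⟨_, hpt⟩ := pvCoeffA_aux k p S hp hS (PySem.List.pyRange 0 k 1)
    (fun x hx => PySem.List.mem_pyRange_one.mp hx) (pvZeros k S) (pvShape_zeros k S)
  rw [hpt j' b' hj0 hjk hb0 hbS,
    if_pos (PySem.List.mem_pyRange_one.mpr ⟨hj0, hjk⟩)]

-- ---- B side: the knapsack scan ----

-- one inner-loop iteration, characterised: only row j+1 changes
lemma pvStepRowB_apply (k p w : Int) (dp : List (List Int)) (hdp : pvShape (k + 1) p dp)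
    (j : Int) (hj0 : 0 ≤ j) (hjk : j < k) :
    pvShape (k + 1) p (pvStepRowB k p w dp j)
    ∧ ∀ j' r', 0 ≤ j' → j' < k + 1 → 0 ≤ r' → r' < p →
      pvGet (pvStepRowB k p w dp j) j' r'
        = if j' = j + 1 then
            pvGet dp (j + 1) r' +
              pvGet dp j (PySem.Int.mod
                (r' - PySem.Int.mod (PySem.Int.powMod 3 (k - 1 - j).toNat p * w) p) p)
          else pvGet dp j' r' := by
  obtain ⟨hlen, hrows⟩ := hdp
  have hjl : (j + 1).toNat < dp.length := by omega
  have hrowlen : ((PySem.List.pyRange 0 p 1).map (fun r =>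
      pvGet dp (j + 1) r +
        pvGet dp j (PySem.Int.mod
          (r - PySem.Int.mod (PySem.Int.powMod 3 (k - 1 - j).toNat p * w) p) p))).length
      = p.toNat := by
    rw [List.length_map, PySem.List.length_pyRange_one]
    omega
  unfold pvStepRowB
  rw [PySem.List.pySetD_of_nonneg _ _ (by omega)]
  constructor
  · constructor
    · rw [List.length_set, hlen]
    · intro row hrow
      rcases List.mem_or_eq_of_mem_set hrow with h | h
      · exact hrows row h
      · rw [h]; exact hrowlen
  · intro j' r' hj'0 hj'k hr'0 hr'p
    unfold pvGet
    have houter : PySem.List.pyGetD (dp.set (j + 1).toNat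
          ((PySem.List.pyRange 0 p 1).map (fun r =>
            PySem.List.pyGetD (PySem.List.pyGetD dp (j + 1) []) r 0 +
              PySem.List.pyGetD (PySem.List.pyGetD dp j []) (PySem.Int.mod
                (r - PySem.Int.mod (PySem.Int.powMod 3 (k - 1 - j).toNat p * w) p) p) 0))) j' []
        = if j' = j + 1 then
            ((PySem.List.pyRange 0 p 1).map (fun r =>
              PySem.List.pyGetD (PySem.List.pyGetD dp (j + 1) []) r 0 +
                PySem.List.pyGetD (PySem.List.pyGetD dp j []) (PySem.Int.mod
                  (r - PySem.Int.mod (PySem.Int.powMod 3 (k - 1 - j).toNat p * w) p) p) 0))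
          else PySem.List.pyGetD dp j' [] := by
      rw [PySem.List.pyGetD_eq_getElem _ _ hj'0 (by rw [List.length_set]; omega),
        List.getElem_set]
      by_cases hjj : j' = j + 1
      · rw [if_pos (by omega), if_pos hjj]
      · rw [if_neg (by omega), if_neg hjj]
        exact (PySem.List.pyGetD_eq_getElem _ _ hj'0 (by omega)).symm
    rw [houter]
    by_cases hjj : j' = j + 1
    · rw [if_pos hjj, if_pos hjj,
        PySem.List.pyGetD_map_pyRange_of_nonneg _ p r' 0 hr'0 hr'p]
    · rw [if_neg hjj, if_neg hjj]

-- one descending inner pass (`for j in reversed(range(n))`), characterised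
lemma pvScanB_inner (k p w : Int) (n : Nat) (hn : (n : Int) ≤ k) (dp : List (List Int))
    (hdp : pvShape (k + 1) p dp) :
    pvShape (k + 1) p
      ((((List.range n).map (fun i : Nat => (i : Int))).reverse.foldl (pvStepRowB k p w) dp))
    ∧ ∀ j' r', 0 ≤ j' → j' < k + 1 → 0 ≤ r' → r' < p →
      pvGet ((((List.range n).map (fun i : Nat => (i : Int))).reverse.foldl (pvStepRowB k p w) dp)) j' r'
          = if 1 ≤ j' ∧ j' ≤ (n : Int) then
              pvGet dp j' r' + pvGet dp (j' - 1)
                (PySem.Int.mod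
                  (r' - PySem.Int.mod
                    (PySem.Int.powMod 3 (k - 1 - (j' - 1)).toNat p * w) p) p)
            else pvGet dp j' r' := by
  induction n generalizing dp with
  | zero =>
    refine ⟨hdp, fun j' r' _ _ _ _ => ?_⟩
    simp only [List.range_zero, List.map_nil, List.reverse_nil, List.foldl_nil, Nat.cast_zero]
    rw [if_neg (by omega)]
  | succ n ih =>
    obtain ⟨h1s, h1p⟩ := pvStepRowB_apply k p w dp hdp (n : Int) (by positivity)
      (by push_cast at hn ⊢; omega)
    obtain ⟨ihs, ihp⟩ := ih (by push_cast at hn ⊢; omega) _ h1s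
    have hrw : ((List.range (n + 1)).map (fun i : Nat => (i : Int))).reverse
        = (n : Int) :: ((List.range n).map (fun i : Nat => (i : Int))).reverse := by
      rw [List.range_succ, List.map_append, List.reverse_append]
      simp
    refine ⟨by rw [hrw, List.foldl_cons]; exact ihs, fun j' r' hj'0 hj'k hr'0 hr'p => ?_⟩
    rw [hrw, List.foldl_cons, ihp j' r' hj'0 hj'k hr'0 hr'p]
    by_cases hr : 1 ≤ j' ∧ j' ≤ (n : Int)
    · rw [if_pos hr, if_pos ⟨hr.1, by push_cast; omega⟩,
        h1p j' r' hj'0 hj'k hr'0 hr'p, if_neg (by omega),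
        h1p (j' - 1) _ (by omega) (by omega)
          (PySem.Int.mod_nonneg _ (by omega)) (PySem.Int.mod_lt _ (by omega)),
        if_neg (by omega)]
    · rw [if_neg hr]
      by_cases hj1 : j' = (n : Int) + 1
      · rw [if_pos (by push_cast; omega), h1p j' r' hj'0 hj'k hr'0 hr'p, if_pos hj1, hj1,
          show (n : Int) + 1 - 1 = (n : Int) by ring]
      · rw [if_neg (by push_cast; omega), h1p j' r' hj'0 hj'k hr'0 hr'p,
          if_neg (by omega)]

lemma pvScanB_apply (k p : Int) (hk : 0 ≤ k) (b : Int) (dp : List (List Int))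
    (hdp : pvShape (k + 1) p dp) :
    pvShape (k + 1) p (pvScanB k p dp b)
    ∧ ∀ j' r', 0 ≤ j' → j' < k + 1 → 0 ≤ r' → r' < p →
      pvGet (pvScanB k p dp b) j' r'
        = if 1 ≤ j' ∧ j' ≤ k then
            pvGet dp j' r' + pvGet dp (j' - 1)
              (PySem.Int.mod (r' - pvCoefFn k p (j' - 1) b) p)
          else pvGet dp j' r' := by
  have h0 : PySem.List.pyRange 0 k 1 = (List.range (k - 0).toNat).map (fun i : Nat => (i : Int)) := by
    rw [PySem.List.pyRange_one]
    exact List.map_congr_left (fun x _ => by ring)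
  unfold pvScanB
  rw [h0]
  obtain ⟨hs, hpt⟩ := pvScanB_inner k p (PySem.Int.powMod 2 b.toNat p) (k - 0).toNat
    (by omega) dp hdp
  refine ⟨hs, fun j' r' hj'0 hj'k hr'0 hr'p => ?_⟩
  rw [hpt j' r' hj'0 hj'k hr'0 hr'p]
  have hc : (((k - 0).toNat : Int)) = k := by omega
  rw [hc]
  rfl

-- B's scan over the first m positions computes pvG
lemma pvScanB_G (k p : Int) (hk : 1 ≤ k) (hp : 0 < p) (m : Nat) :
    pvShape (k + 1) p
      ((PySem.List.pyRange 0 (m : Int) 1).foldl (pvScanB k p) (pvSet (pvZeros (k + 1) p) 0 0 1))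
    ∧ ∀ j r, 0 ≤ j → j < k + 1 → 0 ≤ r → r < p →
      pvGet ((PySem.List.pyRange 0 (m : Int) 1).foldl (pvScanB k p)
        (pvSet (pvZeros (k + 1) p) 0 0 1)) j r
      = pvG k p m j r := by
  have hdp0 : pvShape (k + 1) p (pvSet (pvZeros (k + 1) p) 0 0 1) :=
    pvShape_set (k + 1) p _ (pvShape_zeros (k + 1) p) 0 0 1 le_rfl (by omega) le_rfl
  have hget0 : ∀ j r, 0 ≤ j → j < k + 1 → 0 ≤ r → r < p →
      pvGet (pvSet (pvZeros (k + 1) p) 0 0 1) j r = if j = 0 ∧ r = 0 then 1 else 0 := by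
    intro j r hj0 hjk hr0 hrp
    rw [pvGet_set (k + 1) p _ (pvShape_zeros (k + 1) p) 0 0 1 j r le_rfl (by omega)
      le_rfl hp hj0 hjk hr0 hrp]
    by_cases h : j = 0 ∧ r = 0
    · rw [if_pos h, if_pos h]
    · rw [if_neg h, if_neg h, pvGet_zeros (k + 1) p j r hj0 hjk hr0]
  induction m with
  | zero =>
    refine ⟨by
        rw [show ((0 : Nat) : Int) = 0 from rfl, PySem.List.pyRange_one_eq_nil le_rfl,
          List.foldl_nil]
        exact hdp0,
      fun j r hj0 hjk hr0 hrp => ?_⟩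
    rw [show ((0 : Nat) : Int) = 0 from rfl, PySem.List.pyRange_one_eq_nil le_rfl,
      List.foldl_nil]
    exact hget0 j r hj0 hjk hr0 hrp
  | succ m ih =>
    obtain ⟨ihs, ihp⟩ := ih
    have hsplit : PySem.List.pyRange 0 ((m + 1 : Nat) : Int) 1
        = PySem.List.pyRange 0 (m : Int) 1 ++ [(m : Int)] := by
      rw [show ((m + 1 : Nat) : Int) = (m : Int) + 1 by push_cast; ring,
        PySem.List.pyRange_one_succ_right (by positivity)]
    obtain ⟨hss, hsp⟩ := pvScanB_apply k p (by omega) (m : Int) _ ihs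
    refine ⟨by rw [hsplit, List.foldl_append, List.foldl_cons, List.foldl_nil]; exact hss,
      fun j r hj0 hjk hr0 hrp => ?_⟩
    rw [hsplit, List.foldl_append, List.foldl_cons, List.foldl_nil]
    rw [hsp j r hj0 hjk hr0 hrp]
    have hbt : ((m : Int)).toNat = m := Int.toNat_natCast m
    by_cases hj : 1 ≤ j ∧ j ≤ k
    · rw [if_pos hj]
      have hmod0 : 0 ≤ PySem.Int.mod (r - pvCoefFn k p (j - 1) (m : Int)) p :=
        PySem.Int.mod_nonneg _ hp
      have hmodp : PySem.Int.mod (r - pvCoefFn k p (j - 1) (m : Int)) p < p :=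
        PySem.Int.mod_lt _ hp
      rw [ihp j r hj0 hjk hr0 hrp, ihp _ _ (by omega) (by omega) hmod0 hmodp]
      simp only [pvG]
      rw [if_pos hj]
    · rw [if_neg hj, ihp j r hj0 hjk hr0 hrp]
      simp only [pvG]
      rw [if_neg hj, add_zero]

-- ---- A side: each cumulated layer table equals pvG ----

-- the invariant carried across A's layers: after layer jj, the cumulated table at
-- position b and residue r counts (jj+1)-subsets of {0..b}
def pvInvG (k p : Int) (jj : Int) (pf : List (List Int)) : Prop :=
  pvShape (2 * k + 1) p pf ∧
  ∀ b r, 0 ≤ b → b ≤ (2 * k + 1) - k + jj → 0 ≤ r → r < p →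
    pvGet pf b r = pvG k p (b + 1).toNat (jj + 1) r

-- telescoping the pvG recurrence: summing one layer's fill column equals the next pvG
lemma pvSumFill (k p j : Int) (hj0 : 0 ≤ j) (hjk : j < k) (r : Int)
    (m : Nat) (hm : (m : Int) ≤ (2 * k + 1) - k + j + 1) :
    ((PySem.List.pyRange 0 (m : Int) 1).map (fun i =>
        if j ≤ i ∧ i ≤ (2 * k + 1) - k + j then
          pvG k p i.toNat j (PySem.Int.mod (r - pvCoefFn k p j i) p)
        else 0)).sum
      = pvG k p m (j + 1) r := by
  induction m with
  | zero =>
    rw [show ((0 : Nat) : Int) = 0 from rfl, PySem.List.pyRange_one_eq_nil le_rfl]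
    simp only [List.map_nil, List.sum_nil, pvG]
    rw [if_neg (by omega)]
  | succ m ih =>
    rw [show ((m + 1 : Nat) : Int) = (m : Int) + 1 by push_cast; ring,
      PySem.List.pyRange_one_succ_right (by positivity), List.map_append, List.sum_append]
    rw [ih (by push_cast at hm ⊢; omega)]
    simp only [List.map_cons, List.map_nil, List.sum_cons, List.sum_nil, add_zero]
    simp only [pvG]
    rw [if_pos (show 1 ≤ j + 1 ∧ j + 1 ≤ k by omega),
      show j + 1 - 1 = j by ring]
    by_cases hjm : j ≤ (m : Int)
    · rw [if_pos ⟨hjm, by push_cast at hm ⊢; omega⟩, Int.toNat_natCast]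
    · rw [if_neg (by tauto),
        pvG_zero_of_lt k p m j _ (by omega), add_zero]

-- layer 0 of A establishes the invariant
lemma pvLayer0G (k p : Int) (hk : 1 ≤ k) (hp : 0 < p) :
    pvInvG k p 0
      (pvCum (2 * k + 1) p
        ((PySem.List.pyRange 0 (((2 * k + 1) - k) + 1) 1).foldl
          (fun pf b => pvSet pf b (pvGet (pvCoeffA k p (2 * k + 1)) 0 b)
            (pvGet pf b (pvGet (pvCoeffA k p (2 * k + 1)) 0 b) + 1))
          (pvZeros (2 * k + 1) p))) := by
  have hco : ∀ x, 0 ≤ x → x < 2 * k + 1 →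
      pvGet (pvCoeffA k p (2 * k + 1)) 0 x = pvCoefFn k p 0 x :=
    fun x h0 hS => pvCoeffA_apply k p (2 * k + 1) hp (by omega) 0 x le_rfl (by omega) h0 hS
  obtain ⟨hfs, hfp⟩ := pvFoldl_addOne (2 * k + 1) p
    (PySem.List.pyRange 0 (((2 * k + 1) - k) + 1) 1) (PySem.List.nodup_pyRange_one _ _)
    (fun x hx => by
      have := PySem.List.mem_pyRange_one.mp hx; exact ⟨this.1, by omega⟩)
    (fun b => pvGet (pvCoeffA k p (2 * k + 1)) 0 b)
    (fun x hx => by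
      have hm := PySem.List.mem_pyRange_one.mp hx
      show 0 ≤ pvGet (pvCoeffA k p (2 * k + 1)) 0 x ∧ pvGet (pvCoeffA k p (2 * k + 1)) 0 x < p
      rw [hco x hm.1 (by omega)]
      exact ⟨PySem.Int.mod_nonneg _ hp, PySem.Int.mod_lt _ hp⟩)
    (pvZeros (2 * k + 1) p) (pvShape_zeros _ _)
  refine ⟨pvCum_shape (2 * k + 1) p _ hfs (by omega), fun b r hb0 hbS hr0 hrp => ?_⟩
  rw [pvCum_apply (2 * k + 1) p (by omega) _ hfs b r hb0 (by omega) hr0 hrp]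
  have hfill : ∀ i, i ∈ PySem.List.pyRange 0 (b + 1) 1 →
      pvGet ((PySem.List.pyRange 0 (((2 * k + 1) - k) + 1) 1).foldl
          (fun pf b => pvSet pf b (pvGet (pvCoeffA k p (2 * k + 1)) 0 b)
            (pvGet pf b (pvGet (pvCoeffA k p (2 * k + 1)) 0 b) + 1))
          (pvZeros (2 * k + 1) p)) i r
        = if (0 : Int) ≤ i ∧ i ≤ (2 * k + 1) - k + 0 then
            pvG k p i.toNat 0 (PySem.Int.mod (r - pvCoefFn k p 0 i) p)
          else 0 := by
    intro i hi
    obtain ⟨hi0, hib⟩ := PySem.List.mem_pyRange_one.mp hi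
    have hiS : i < 2 * k + 1 := by omega
    rw [hfp i r hi0 hiS hr0 hrp, pvG_row0]
    by_cases hin : i ≤ (2 * k + 1) - k
    · have hcoi := hco i hi0 hiS
      have hc0 : 0 ≤ pvCoefFn k p 0 i := PySem.Int.mod_nonneg _ hp
      have hcp : pvCoefFn k p 0 i < p := PySem.Int.mod_lt _ hp
      rw [pvGet_zeros (2 * k + 1) p i r hi0 hiS hr0, if_pos (show (0:Int) ≤ i ∧ i ≤ (2 * k + 1) - k + 0 from ⟨hi0, by omega⟩)]
      by_cases hrc : r = pvCoefFn k p 0 i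
      · rw [if_pos (show i ∈ PySem.List.pyRange 0 (((2 * k + 1) - k) + 1) 1
              ∧ r = pvGet (pvCoeffA k p (2 * k + 1)) 0 i from
            ⟨PySem.List.mem_pyRange_one.mpr ⟨hi0, by omega⟩, by rw [hcoi]; exact hrc⟩),
          if_pos ((pvModSubZero r _ p hp hr0 hrp hc0 hcp).mpr hrc)]
        norm_num
      · rw [if_neg (show ¬(i ∈ PySem.List.pyRange 0 (((2 * k + 1) - k) + 1) 1
              ∧ r = pvGet (pvCoeffA k p (2 * k + 1)) 0 i) from
            fun h => hrc (by rw [← hcoi]; exact h.2)),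
          if_neg (fun h => hrc ((pvModSubZero r _ p hp hr0 hrp hc0 hcp).mp h))]
    · rw [if_neg (show ¬(i ∈ PySem.List.pyRange 0 (((2 * k + 1) - k) + 1) 1
            ∧ r = pvGet (pvCoeffA k p (2 * k + 1)) 0 i) from fun h => by
          have := PySem.List.mem_pyRange_one.mp h.1; omega),
        if_neg (show ¬((0:Int) ≤ i ∧ i ≤ (2 * k + 1) - k + 0) from by omega),
        pvGet_zeros (2 * k + 1) p i r hi0 hiS hr0]
  rw [List.map_congr_left hfill]
  have := pvSumFill k p 0 le_rfl (by omega) r (b + 1).toNat (by omega)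
  rw [show (((b + 1).toNat : Int)) = b + 1 by omega] at this
  rw [this, show (0 : Int) + 1 = 1 from rfl]

-- one of A's layer steps preserves the invariant
lemma pvStepG (k p : Int) (hk : 1 ≤ k) (hp : 0 < p) (j : Int) (hj1 : 1 ≤ j)
    (hjk : j < k) (pf : List (List Int)) (hpf : pvInvG k p (j - 1) pf) :
    pvInvG k p j (pvStepA k p (2 * k + 1) (pvCoeffA k p (2 * k + 1)) pf j) := by
  obtain ⟨hpfs, hpfp⟩ := hpf
  obtain ⟨hfs, hfp⟩ := pvFoldl_setBlock (2 * k + 1) p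
    (PySem.List.pyRange j (((2 * k + 1) - (k - j)) + 1) 1)
    (fun x hx => by
      have := PySem.List.mem_pyRange_one.mp hx
      exact ⟨by omega, by omega⟩)
    (fun b r => pvGet pf (b - 1)
      (PySem.Int.mod (r - pvGet (pvCoeffA k p (2 * k + 1)) j b) p))
    (pvZeros (2 * k + 1) p) (pvShape_zeros _ _)
  unfold pvStepA
  refine ⟨pvCum_shape (2 * k + 1) p _ hfs (by omega), fun b r hb0 hbS hr0 hrp => ?_⟩
  rw [pvCum_apply (2 * k + 1) p (by omega) _ hfs b r hb0 (by omega) hr0 hrp]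
  have hfill : ∀ i, i ∈ PySem.List.pyRange 0 (b + 1) 1 →
      pvGet ((PySem.List.pyRange j (((2 * k + 1) - (k - j)) + 1) 1).foldl (fun np b =>
          (PySem.List.pyRange 0 p 1).foldl (fun np r =>
            pvSet np b r (pvGet pf (b - 1)
              (PySem.Int.mod (r - pvGet (pvCoeffA k p (2 * k + 1)) j b) p))) np)
        (pvZeros (2 * k + 1) p)) i r
      = if j ≤ i ∧ i ≤ (2 * k + 1) - k + j then
          pvG k p i.toNat j (PySem.Int.mod (r - pvCoefFn k p j i) p)
        else 0 := by
    intro i hi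
    obtain ⟨hi0, hib⟩ := PySem.List.mem_pyRange_one.mp hi
    have hiS : i < 2 * k + 1 := by omega
    rw [hfp i r hi0 hiS hr0 hrp]
    by_cases hin : j ≤ i ∧ i ≤ (2 * k + 1) - k + j
    · have hmem : i ∈ PySem.List.pyRange j (((2 * k + 1) - (k - j)) + 1) 1 :=
        PySem.List.mem_pyRange_one.mpr ⟨hin.1, by omega⟩
      rw [if_pos hmem, if_pos hin,
        pvCoeffA_apply k p (2 * k + 1) hp (by omega) j i (by omega) hjk hi0 hiS]
      have hmod0 : 0 ≤ PySem.Int.mod (r - pvCoefFn k p j i) p := PySem.Int.mod_nonneg _ hp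
      have hmodp : PySem.Int.mod (r - pvCoefFn k p j i) p < p := PySem.Int.mod_lt _ hp
      rw [hpfp (i - 1) _ (by omega) (by omega) hmod0 hmodp,
        show i - 1 + 1 = i by ring, show (j - 1 + 1 : Int) = j by ring]
    · rw [if_neg (fun h => by
          have := PySem.List.mem_pyRange_one.mp h; omega),
        if_neg hin, pvGet_zeros (2 * k + 1) p i r hi0 hiS hr0]
  rw [List.map_congr_left hfill]
  have := pvSumFill k p j (by omega) hjk r (b + 1).toNat (by omega)
  rw [show (((b + 1).toNat : Int)) = b + 1 by omega] at this
  rw [this]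

-- A's layer fold over range(1, k), via List.range
lemma pvLayersG (k p : Int) (hk : 1 ≤ k) (hp : 0 < p) (pf0 : List (List Int))
    (h0 : pvInvG k p 0 pf0) (t : Nat) (ht : (t : Int) ≤ k - 1) :
    pvInvG k p t
      ((List.range t).foldl
        (fun pf (i : Nat) => pvStepA k p (2 * k + 1) (pvCoeffA k p (2 * k + 1)) pf
          (1 + (i : Int))) pf0) := by
  induction t with
  | zero => exact h0
  | succ t ih =>
    rw [List.range_succ, List.foldl_append, List.foldl_cons, List.foldl_nil]
    have hstep := pvStepG k p hk hp (1 + (t : Int)) (by omega)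
      (by push_cast at ht ⊢; omega) _
      (by
        have := ih (by push_cast at ht ⊢; omega)
        rwa [show (1 : Int) + (t : Int) - 1 = (t : Int) by ring])
    rwa [show ((t + 1 : Nat) : Int) = 1 + (t : Int) by push_cast; ring]

-- the main equivalence on the precondition
lemma pvMain (k p : Int) (hk : 1 ≤ k) (hp : 1 ≤ p) :
    exact_N0_by_dp k p = exact_N0_by_dp_alt k p := by
  have hp' : 0 < p := hp
  simp only [exact_N0_by_dp, exact_N0_by_dp_alt]
  have hA : pvInvG k p (k - 1)
      ((PySem.List.pyRange 1 k 1).foldl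
        (pvStepA k p (2 * k + 1) (pvCoeffA k p (2 * k + 1)))
        (pvCum (2 * k + 1) p
          ((PySem.List.pyRange 0 (((2 * k + 1) - k) + 1) 1).foldl
            (fun pf b => pvSet pf b (pvGet (pvCoeffA k p (2 * k + 1)) 0 b)
              (pvGet pf b (pvGet (pvCoeffA k p (2 * k + 1)) 0 b) + 1))
            (pvZeros (2 * k + 1) p)))) := by
    have h0 := pvLayer0G k p hk hp'
    have := pvLayersG k p hk hp' _ h0 (k - 1).toNat (by omega)
    rw [show (((k - 1).toNat : Int)) = k - 1 by omega] at this
    rw [PySem.List.pyRange_one 1 k, List.foldl_map]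
    exact this
  have hAval := hA.2 (2 * k + 1 - 1) 0 (by omega) (by omega) le_rfl hp'
  rw [show (2 * k + 1 - 1 + 1 : Int) = 2 * k + 1 by ring] at hAval
  rw [show (k - 1 + 1 : Int) = k by ring] at hAval
  have hB := (pvScanB_G k p hk hp' (2 * k + 1).toNat).2 k 0 (by omega) (by omega) le_rfl hp'
  rw [show (((2 * k + 1).toNat : Int)) = 2 * k + 1 by omega] at hB
  rw [hAval, hB]

-- ===== VERDICT (by name: the statement is the Claim_ definition above) =====
theorem exact_N0_by_dp_spec : Claim_equal_exact_N0_by_dp := by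
  intro k mod_val _hDom hPre
  unfold Spec_exact_N0_by_dp
  exact pvMain k mod_val hPre.1 hPre.2
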